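-- pv_equiv track=rewrite | github.com/ravenassoares-source/meu-projeto-python | avl.py | separar_palavras
-- ===== SOURCE A (Python) =====
-- def eh_letra(c):
--     return ('a' <= c <= 'z') or ('A' <= c <= 'Z') or c in 'áàâãéèêíóôõúçñÁÀÂÃÉÈÊÍÓÔÕÚÇÑ'
--
-- def separar_palavras(linha):
--     palavras = []
--     atual = ''
--     for c in linha:
--         if eh_letra(c):
--             atual += c.lower()
--         else:
--             if atual:
--                 palavras.append(atual)
--                 atual = ''
--     if atual:
--         palavras.append(atual)
--     return palavras
-- ===== SOURCE B (Python) =====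
-- def eh_letra(c):
--     return ('a' <= c <= 'z') or ('A' <= c <= 'Z') or c in 'áàâãéèêíóôõúçñÁÀÂÃÉÈÊÍÓÔÕÚÇÑ'
--
-- def separar_palavras(linha):
--     palavras = []
--     pos = 0
--     n = len(linha)
--     while pos < n:
--         if eh_letra(linha[pos]):
--             fim = pos
--             while fim < n and eh_letra(linha[fim]):
--                 fim += 1
--             palavras.append(''.join(map(str.lower, linha[pos:fim])))
--             pos = fim
--         else:
--             pos += 1
--     return palavras
-- ===== Notes on version B (the rewrite author's own statement) =====
-- stated objective: alternative
-- what changed: B replaces A's character-by-character buffer-and-flush accumulator by a run scan: it skips separators, spans each maximal letter run with an inner index loop, and emits the lowercased run as a whole slice.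
import Mathlib
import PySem

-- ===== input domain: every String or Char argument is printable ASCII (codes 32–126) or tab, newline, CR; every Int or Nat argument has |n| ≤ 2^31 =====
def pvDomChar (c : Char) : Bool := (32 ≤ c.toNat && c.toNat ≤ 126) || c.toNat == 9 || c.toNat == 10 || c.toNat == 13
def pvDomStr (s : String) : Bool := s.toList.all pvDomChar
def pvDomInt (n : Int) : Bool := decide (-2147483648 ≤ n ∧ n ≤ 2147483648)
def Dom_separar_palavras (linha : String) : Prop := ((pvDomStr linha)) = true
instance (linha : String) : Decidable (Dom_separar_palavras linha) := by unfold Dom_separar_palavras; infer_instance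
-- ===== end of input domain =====

-- B replaces A's char-by-char buffer-and-flush accumulator by a run scan (skip
-- separators, span each maximal letter run, emit the lowercased run whole); objective: alternative.


-- ===== PORT A =====
-- the accented-letter literal of eh_letra, as the list of its characters
def ehLetraAcentos : List Char :=
  ['á','à','â','ã','é','è','ê','í','ó','ô','õ','ú','ç','ñ','Á','À','Â','Ã','É','È','Ê','Í','Ó','Ô','Õ','Ú','Ç','Ñ']

def eh_letra (c : Char) : Bool :=
  (decide ('a' ≤ c) && decide (c ≤ 'z')) || (decide ('A' ≤ c) && decide (c ≤ 'Z')) ||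
    ehLetraAcentos.contains c

-- A's for-loop, state = (palavras, atual); atual kept as List Char, a word is emitted as a String
def sepGo : List Char → List String → List Char → List String
  | [], palavras, atual =>
      if atual.isEmpty then palavras else palavras ++ [String.ofList atual]
  | c :: rest, palavras, atual =>
      if eh_letra c then
        sepGo rest palavras (atual ++ [PySem.Chars.lowerChar c])
      else
        if atual.isEmpty then sepGo rest palavras atual
        else sepGo rest (palavras ++ [String.ofList atual]) []

def separar_palavras (linha : String) : List String :=
  sepGo linha.toList [] []

-- ===== PORT B =====
-- B's outer while-loop; the inner `while fim < n and eh_letra(linha[fim])` index scan is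
-- the list span takeWhile/dropWhile on the current suffix, the slice linha[pos:fim] is its takeWhile
def altGo : List Char → List String
  | [] => []
  | c :: rest =>
      if h : eh_letra c then
        String.ofList (((c :: rest).takeWhile eh_letra).map PySem.Chars.lowerChar) ::
          altGo ((c :: rest).dropWhile eh_letra)
      else
        altGo rest
termination_by l => l.length
decreasing_by
  · simp only [List.dropWhile_cons, h, if_true]
    have := List.length_dropWhile_le eh_letra rest
    simp only [List.length_cons]
    omega
  · simp

def separar_palavras_alt (linha : String) : List String :=
  altGo linha.toList

-- ===== PRECONDITION & SPEC =====
def Spec_separar_palavras (linha : String) (out : List String) : Prop := out = separar_palavras_alt linha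
instance (linha : String) (out : List String) : Decidable (Spec_separar_palavras linha out) := by unfold Spec_separar_palavras; infer_instance

-- ===== CLAIM (what is proved, stated in full; the proofs are below) =====
def Claim_equal_separar_palavras : Prop := ∀ (linha : String), Dom_separar_palavras linha → Spec_separar_palavras linha (separar_palavras linha)

-- ===== LEMMAS AND PROOFS =====

-- invariant: A's loop with pending buffer `atual` equals B's run scan, the pending buffer
-- completing the letter run at the front of the remaining input
lemma sepGo_eq_altGo (l : List Char) : ∀ (palavras : List String) (atual : List Char),
    sepGo l palavras atual =
      palavras ++
        (if atual.isEmpty then altGo l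
         else String.ofList (atual ++ (l.takeWhile eh_letra).map PySem.Chars.lowerChar) ::
                altGo (l.dropWhile eh_letra)) := by
  induction l with
  | nil =>
      intro palavras atual
      by_cases h : atual.isEmpty
      · simp [sepGo, h, altGo]
      · simp [sepGo, h, altGo]
  | cons c rest ih =>
      intro palavras atual
      by_cases hl : eh_letra c
      · rw [show sepGo (c :: rest) palavras atual
              = sepGo rest palavras (atual ++ [PySem.Chars.lowerChar c]) by simp [sepGo, hl]]
        rw [ih palavras (atual ++ [PySem.Chars.lowerChar c])]
        have hne : (atual ++ [PySem.Chars.lowerChar c]).isEmpty = false := by simp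
        rw [hne]
        by_cases h : atual.isEmpty
        · have ha : atual = [] := List.isEmpty_iff.mp h
          subst ha
          simp [altGo, hl]
        · simp [h, hl]
      · rw [show (if atual.isEmpty then altGo (c :: rest)
              else String.ofList (atual ++ ((c :: rest).takeWhile eh_letra).map PySem.Chars.lowerChar) ::
                altGo ((c :: rest).dropWhile eh_letra))
              = (if atual.isEmpty then altGo rest
                 else String.ofList atual :: altGo (c :: rest)) by
            by_cases h : atual.isEmpty
            · simp [h, altGo, hl]
            · simp [h, hl]]
        by_cases h : atual.isEmpty
        · have ha : atual = [] := List.isEmpty_iff.mp h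
          subst ha
          rw [show sepGo (c :: rest) palavras [] = sepGo rest palavras [] by simp [sepGo, hl]]
          simpa using ih palavras []
        · rw [show sepGo (c :: rest) palavras atual
                = sepGo rest (palavras ++ [String.ofList atual]) [] by simp [sepGo, hl, h]]
          rw [ih (palavras ++ [String.ofList atual]) []]
          have ha : atual ≠ [] := by simpa [List.isEmpty_iff] using h
          simp [altGo, hl, ha]

-- ===== VERDICT (by name: the statement is the Claim_ definition above) =====
theorem separar_palavras_spec : Claim_equal_separar_palavras := by
  intro linha _hdom
  unfold Spec_separar_palavras separar_palavras separar_palavras_alt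
  simpa using sepGo_eq_altGo linha.toList [] []
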